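-- pv_equiv track=rewrite | github.com/RiklloD/CyberZen | services/sbom-ingest/src/sentinel_sbom_ingest/parser.py | _collect_node_workspace_groups
-- ===== SOURCE A (Python) =====
-- NODE_DIRECT_GROUPS = ("dependencies", "optionalDependencies", "peerDependencies")
--
-- NODE_BUILD_GROUPS = ("devDependencies",)
--
-- def _normalize_name(raw_name: str) -> str:
--     return raw_name.strip().lower().replace("_", "-")
--
-- def _collect_node_workspace_groups(
--     workspace_entries: dict[str, object],
-- ) -> tuple[set[str], set[str]]:
--     direct_names: set[str] = set()
--     build_names: set[str] = set()
--
--     for raw_workspace in workspace_entries.values():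
--         if not isinstance(raw_workspace, dict):
--             continue
--
--         for group_name in NODE_DIRECT_GROUPS:
--             entries = raw_workspace.get(group_name, {})
--             if not isinstance(entries, dict):
--                 continue
--
--             for raw_name in entries:
--                 direct_names.add(_normalize_name(raw_name))
--
--         for group_name in NODE_BUILD_GROUPS:
--             entries = raw_workspace.get(group_name, {})
--             if not isinstance(entries, dict):
--                 continue
--
--             for raw_name in entries:
--                 build_names.add(_normalize_name(raw_name))
--
--     return direct_names, build_names
-- ===== SOURCE B (Python) =====
-- NODE_DIRECT_GROUPS = ("dependencies", "optionalDependencies", "peerDependencies")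
--
-- NODE_BUILD_GROUPS = ("devDependencies",)
--
--
-- def _normalize_name(raw_name: str) -> str:
--     return raw_name.strip().lower().replace("_", "-")
--
--
-- def _workspace_names(workspace, groups):
--     # normalized names of one workspace's listed dependency groups
--     return {
--         _normalize_name(raw_name)
--         for group in groups
--         for entries in [workspace.get(group, {})]
--         if isinstance(entries, dict)
--         for raw_name in entries
--     }
--
--
-- def _merge(values):
--     # divide and conquer: split the workspace values in half, solve each half
--     # independently, combine the two (direct, build) results by set union
--     if not values:
--         return set(), set()
--     if len(values) == 1:
--         workspace = values[0]
--         if not isinstance(workspace, dict):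
--             return set(), set()
--         return (
--             _workspace_names(workspace, NODE_DIRECT_GROUPS),
--             _workspace_names(workspace, NODE_BUILD_GROUPS),
--         )
--     mid = len(values) // 2
--     left_direct, left_build = _merge(values[:mid])
--     right_direct, right_build = _merge(values[mid:])
--     return left_direct | right_direct, left_build | right_build
--
--
-- def _collect_node_workspace_groups(
--     workspace_entries: dict[str, object],
-- ) -> tuple[set[str], set[str]]:
--     return _merge(list(workspace_entries.values()))
-- ===== Notes on version B (the rewrite author's own statement) =====
-- stated objective: alternative
-- what changed: Replaces A's single left-to-right sweep threading two mutable accumulator sets through nested loops with a divide-and-conquer recursion: the workspace values are split in half, each half is solved independently (per-workspace contributions computed as set comprehensions), and the two (direct, build) results are combined by set union.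
import Mathlib
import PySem

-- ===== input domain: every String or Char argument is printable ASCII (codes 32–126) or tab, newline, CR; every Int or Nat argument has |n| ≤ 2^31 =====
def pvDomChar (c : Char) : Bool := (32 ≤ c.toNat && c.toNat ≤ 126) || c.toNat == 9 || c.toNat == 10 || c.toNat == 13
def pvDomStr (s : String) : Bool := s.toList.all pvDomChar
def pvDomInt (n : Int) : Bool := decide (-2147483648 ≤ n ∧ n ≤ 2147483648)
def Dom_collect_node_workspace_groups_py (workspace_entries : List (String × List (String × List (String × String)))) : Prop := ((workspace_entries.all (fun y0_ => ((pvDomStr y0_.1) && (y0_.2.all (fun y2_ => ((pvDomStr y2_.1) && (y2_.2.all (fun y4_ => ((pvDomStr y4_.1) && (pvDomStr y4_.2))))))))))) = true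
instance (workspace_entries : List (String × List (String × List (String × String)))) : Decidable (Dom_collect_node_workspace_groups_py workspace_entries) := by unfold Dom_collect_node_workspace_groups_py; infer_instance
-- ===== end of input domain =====

-- B replaces A's left-to-right sweep with two mutable accumulator sets by a divide-and-conquer
-- recursion (split the workspace values in half, solve each half, combine by set union); objective: alternative.


-- ===== PORT A =====
def normalize_name_py (raw_name : String) : String :=
  PySem.Str.replace (PySem.Str.lower (PySem.Str.strip raw_name)) "_" "-"

-- NODE_DIRECT_GROUPS / NODE_BUILD_GROUPS module constants
def NODE_DIRECT_GROUPS : List String := ["dependencies", "optionalDependencies", "peerDependencies"]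
def NODE_BUILD_GROUPS : List String := ["devDependencies"]

-- literal port of A: pair of sets threaded through the workspace loop, add per name
def collect_node_workspace_groups_py (workspace_entries : List (String × List (String × List (String × String)))) : List String × List String :=
  let direct_names : PySem.Set String := PySem.Set.empty
  let build_names : PySem.Set String := PySem.Set.empty
  let acc := (workspace_entries.map Prod.snd).foldl
    (fun (acc : PySem.Set String × PySem.Set String) raw_workspace =>
      -- (every workspace value is a dict at this type, so the isinstance guard always passes)
      let direct_names := NODE_DIRECT_GROUPS.foldl
        (fun dn group_name =>
          let entries := PySem.Dict.getD (PySem.Dict.mk raw_workspace) group_name []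
          -- (entries is always a dict at this type)
          entries.foldl (fun dn (kv : String × String) => PySem.Set.add dn (normalize_name_py kv.1)) dn)
        acc.1
      let build_names := NODE_BUILD_GROUPS.foldl
        (fun bn group_name =>
          let entries := PySem.Dict.getD (PySem.Dict.mk raw_workspace) group_name []
          entries.foldl (fun bn (kv : String × String) => PySem.Set.add bn (normalize_name_py kv.1)) bn)
        acc.2
      (direct_names, build_names))
    (direct_names, build_names)
  acc

-- ===== PORT B =====
-- normalized names of one workspace's listed dependency groups (set comprehension = ofList of the generated names)
def workspace_names_py (workspace : List (String × List (String × String))) (groups : List String) : PySem.Set String :=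
  PySem.Set.ofList (groups.flatMap (fun group =>
    -- (entries is always a dict at this type, so the isinstance guard always passes)
    (PySem.Dict.getD (PySem.Dict.mk workspace) group ([] : List (String × String))).map
      (fun kv => normalize_name_py kv.1)))

-- divide and conquer: split the values in half, solve each half, combine by set union
def merge_py (values : List (List (String × List (String × String)))) : PySem.Set String × PySem.Set String :=
  match values with
  | [] => (PySem.Set.empty, PySem.Set.empty)
  | [workspace] =>
      -- (the single value is a dict at this type, so the isinstance guard always passes)
      (workspace_names_py workspace NODE_DIRECT_GROUPS, workspace_names_py workspace NODE_BUILD_GROUPS)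
  | v1 :: v2 :: rest =>
      let vs := v1 :: v2 :: rest
      let mid := vs.length / 2
      let l := merge_py (vs.take mid)   -- values[:mid] (0 ≤ mid ≤ len: slice = take)
      let r := merge_py (vs.drop mid)   -- values[mid:] (slice = drop)
      (PySem.Set.union l.1 r.1, PySem.Set.union l.2 r.2)
termination_by values.length
decreasing_by
  · simp [List.length_take]; omega
  · simp [List.length_drop]; omega

def collect_node_workspace_groups_py_alt (workspace_entries : List (String × List (String × List (String × String)))) : List String × List String :=
  merge_py (workspace_entries.map Prod.snd)

-- ===== PRECONDITION & SPEC =====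
def Spec_collect_node_workspace_groups_py (workspace_entries : List (String × List (String × List (String × String)))) (out : List String × List String) : Prop := out = collect_node_workspace_groups_py_alt workspace_entries
instance (workspace_entries : List (String × List (String × List (String × String)))) (out : List String × List String) : Decidable (Spec_collect_node_workspace_groups_py workspace_entries out) := by unfold Spec_collect_node_workspace_groups_py; infer_instance

-- ===== CLAIM (what is proved, stated in full; the proofs are below) =====
def Claim_equal_collect_node_workspace_groups_py : Prop := ∀ (workspace_entries : List (String × List (String × List (String × String)))), Dom_collect_node_workspace_groups_py workspace_entries → Spec_collect_node_workspace_groups_py workspace_entries (collect_node_workspace_groups_py workspace_entries)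

-- ===== LEMMAS AND PROOFS =====

-- the flat list of normalized names of the given groups across a list of workspace values
def pvNames (values : List (List (String × List (String × String)))) (groups : List String) : List String :=
  values.flatMap (fun workspace =>
    groups.flatMap (fun group =>
      (PySem.Dict.getD (PySem.Dict.mk workspace) group ([] : List (String × String))).map
        (fun kv => normalize_name_py kv.1)))

-- union of two deduplicated lists is dedup of the concatenation
theorem union_ofList (l1 l2 : List String) :
    PySem.Set.union (PySem.Set.ofList l1) (PySem.Set.ofList l2) = PySem.Set.ofList (l1 ++ l2) := by
  show PySem.Set.update _ _ = _
  rw [PySem.Set.update_eq_append_filter, PySem.Set.ofList_ofList, PySem.Set.ofList_append,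
      PySem.Set.update_eq_append_filter]

-- pvNames splits across a take/drop split of the values
theorem pvNames_take_drop (values : List (List (String × List (String × String)))) (groups : List String) (mid : Nat) :
    pvNames (values.take mid) groups ++ pvNames (values.drop mid) groups = pvNames values groups := by
  unfold pvNames
  rw [← List.flatMap_append, List.take_append_drop]

-- B's divide-and-conquer computes the dedup of the flat name lists
theorem merge_py_spec (values : List (List (String × List (String × String)))) :
    merge_py values = (PySem.Set.ofList (pvNames values NODE_DIRECT_GROUPS),
                       PySem.Set.ofList (pvNames values NODE_BUILD_GROUPS)) := by
  fun_induction merge_py values with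
  | case1 => rfl
  | case2 w => simp [workspace_names_py, pvNames]
  | case3 v1 v2 rest vs mid l r ihl ihr =>
      show (PySem.Set.union (merge_py (vs.take mid)).1 (merge_py (vs.drop mid)).1,
            PySem.Set.union (merge_py (vs.take mid)).2 (merge_py (vs.drop mid)).2) = _
      rw [ihl, ihr]
      dsimp only
      rw [union_ofList, union_ofList, pvNames_take_drop, pvNames_take_drop]

-- pointwise-equal step functions fold alike
theorem foldl_fun_congr {α β : Type} (l : List α) (f g : β → α → β) (s : β)
    (h : ∀ b a, f b a = g b a) : l.foldl f s = l.foldl g s := by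
  have hfg : f = g := funext fun b => funext fun a => h b a
  rw [hfg]

-- folding Set.update of f over a list is one update by the flattened list
theorem foldl_update_flatMap {α : Type} (l : List α) (f : α → List String) (s : PySem.Set String) :
    l.foldl (fun s a => PySem.Set.update s (f a)) s = PySem.Set.update s (l.flatMap f) := by
  induction l generalizing s with
  | nil => simp [PySem.Set.update]
  | cons x xs ih => simp [List.foldl, ih, PySem.Set.update_append]

-- A's inner group loop (add per name) is one Set.update by the gathered names of the groups
theorem group_fold_eq (w : List (String × List (String × String))) (groups : List String)
    (t : PySem.Set String) :
    groups.foldl (fun dn group_name =>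
        (PySem.Dict.getD (PySem.Dict.mk w) group_name ([] : List (String × String))).foldl
          (fun dn kv => PySem.Set.add dn (normalize_name_py kv.1)) dn) t
      = PySem.Set.update t (groups.flatMap (fun group =>
          (PySem.Dict.getD (PySem.Dict.mk w) group ([] : List (String × String))).map
            (fun kv => normalize_name_py kv.1))) := by
  rw [← foldl_update_flatMap]
  refine foldl_fun_congr _ _ _ _ (fun dn g => ?_)
  rw [← PySem.Set.update_map_eq_foldl_add]

-- A's whole workspace loop, both components at once
theorem both_eq (ws : List (List (String × List (String × String))))
    (d b : PySem.Set String) :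
    ws.foldl (fun acc raw_workspace =>
        (NODE_DIRECT_GROUPS.foldl (fun dn group_name =>
            (PySem.Dict.getD (PySem.Dict.mk raw_workspace) group_name ([] : List (String × String))).foldl
              (fun dn kv => PySem.Set.add dn (normalize_name_py kv.1)) dn) acc.1,
         NODE_BUILD_GROUPS.foldl (fun bn group_name =>
            (PySem.Dict.getD (PySem.Dict.mk raw_workspace) group_name ([] : List (String × String))).foldl
              (fun bn kv => PySem.Set.add bn (normalize_name_py kv.1)) bn) acc.2)) (d, b)
      = (PySem.Set.update d (pvNames ws NODE_DIRECT_GROUPS),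
         PySem.Set.update b (pvNames ws NODE_BUILD_GROUPS)) := by
  induction ws generalizing d b with
  | nil => simp [pvNames, PySem.Set.update]
  | cons w rest ih =>
      simp only [List.foldl_cons, pvNames, List.flatMap_cons]
      rw [group_fold_eq, group_fold_eq, ih, PySem.Set.update_append, PySem.Set.update_append]
      simp [pvNames]

-- ===== VERDICT (by name: the statement is the Claim_ definition above) =====
theorem collect_node_workspace_groups_py_spec : Claim_equal_collect_node_workspace_groups_py := by
  intro we _
  unfold Spec_collect_node_workspace_groups_py collect_node_workspace_groups_py
    collect_node_workspace_groups_py_alt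
  dsimp only
  rw [both_eq, merge_py_spec]
  rw [show (PySem.Set.empty : PySem.Set String) = [] from rfl,
      PySem.Set.update_nil_left, PySem.Set.update_nil_left]
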